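-- pv_equiv track=rewrite | github.com/dwavesystems/penaltymodel | penaltymodel_core/penaltymodel/core/deleteme.py | get_quadratic
-- ===== SOURCE A (Python) =====
-- from collections import defaultdict
--
-- def get_quadratic(linear_dict):
--     linear_keys = list(linear_dict.keys())
--     quadratic = defaultdict(int)
--
--     for k0 in linear_keys:
--         for k1 in linear_keys:
--             a0, a1 = sorted([k0, k1])
--             quadratic[(a0, a1)] += linear_dict[a0] * linear_dict[a1]
--     return quadratic
-- ===== SOURCE B (Python) =====
-- from collections import defaultdict
--
-- def get_quadratic(linear_dict):
--     # One triangular pass with direct assignment: diagonal gets v*v once,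
--     # each unordered off-diagonal pair gets 2*v0*v1 once (A accumulates it twice).
--     quadratic = defaultdict(int)
--     rest = list(linear_dict.items())
--     while rest:
--         k0, v0 = rest.pop(0)
--         quadratic[(k0, k0)] = v0 * v0
--         for k1, v1 in rest:
--             a0, a1 = (k1, k0) if k1 < k0 else (k0, k1)
--             quadratic[(a0, a1)] = 2 * v0 * v1
--     return quadratic
-- ===== Notes on version B (the rewrite author's own statement) =====
-- stated objective: alternative
-- what changed: A accumulates every entry over a full n*n double scan of the key list with defaultdict +=; B makes one triangular pass over the items, popping each key and directly assigning its row once (diagonal v*v, each off-diagonal sorted pair 2*v0*v1), so no entry is ever revisited or accumulated.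
import Mathlib
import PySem

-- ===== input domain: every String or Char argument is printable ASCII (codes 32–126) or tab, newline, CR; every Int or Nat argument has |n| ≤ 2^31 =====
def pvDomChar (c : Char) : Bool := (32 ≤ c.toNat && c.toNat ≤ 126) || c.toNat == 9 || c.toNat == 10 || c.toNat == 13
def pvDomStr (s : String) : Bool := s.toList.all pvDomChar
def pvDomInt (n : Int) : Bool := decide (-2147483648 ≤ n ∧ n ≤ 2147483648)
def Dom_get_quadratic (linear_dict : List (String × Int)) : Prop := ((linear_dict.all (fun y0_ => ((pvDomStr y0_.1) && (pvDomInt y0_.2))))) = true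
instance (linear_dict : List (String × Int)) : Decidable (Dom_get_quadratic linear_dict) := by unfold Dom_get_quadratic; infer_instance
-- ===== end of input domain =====

-- B replaces A's full n×n accumulation pass by one triangular pass that assigns each
-- entry once (diagonal v*v, off-diagonal 2*v0*v1) — objective: alternative decomposition.

-- ===== PORT A =====
-- one step of A's inner loop: sorted([k0, k1]) on a two-element list is exactly the
-- comparison below; linear_dict[a0] / linear_dict[a1] never raise (a0, a1 are keys), so getD is exact
def innerA (d : PySem.Dict String Int) (q : PySem.Dict (String × String) Int)
    (k0 k1 : String) : PySem.Dict (String × String) Int :=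
  let a0 := if k1 < k0 then k1 else k0
  let a1 := if k1 < k0 then k0 else k1
  q.modify (a0, a1) 0 (· + d.getD a0 0 * d.getD a1 0)

def get_quadratic (linear_dict : List (String × Int)) : List (String × String × Int) :=
  let d := PySem.Dict.ofList linear_dict
  let linear_keys := d.keys
  let quadratic : PySem.Dict (String × String) Int :=
    linear_keys.foldl (fun q k0 => linear_keys.foldl (fun q k1 => innerA d q k0 k1) q)
      PySem.Dict.empty
  quadratic.items.map (fun p => (p.1.1, p.1.2, p.2))

-- ===== PORT B =====
-- one step of B's inner loop: quadratic[(a0, a1)] = 2 * v0 * v1 (plain assignment)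
def stepB (k0 : String) (v0 : Int) (q : PySem.Dict (String × String) Int)
    (p : String × Int) : PySem.Dict (String × String) Int :=
  let a := if p.1 < k0 then (p.1, k0) else (k0, p.1)
  q.insert a (2 * v0 * p.2)

-- B's while loop: pop the first item, assign its row, continue on the rest
def goB (q : PySem.Dict (String × String) Int) :
    List (String × Int) → PySem.Dict (String × String) Int
  | [] => q
  | (k0, v0) :: rest => goB (rest.foldl (stepB k0 v0) (q.insert (k0, k0) (v0 * v0))) rest

def get_quadratic_alt (linear_dict : List (String × Int)) : List (String × String × Int) :=
  (goB PySem.Dict.empty (PySem.Dict.ofList linear_dict).items).items.map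
    (fun p => (p.1.1, p.1.2, p.2))

-- ===== PRECONDITION & SPEC =====
def Spec_get_quadratic (linear_dict : List (String × Int)) (out : List (String × String × Int)) : Prop := out = get_quadratic_alt linear_dict
instance (linear_dict : List (String × Int)) (out : List (String × String × Int)) : Decidable (Spec_get_quadratic linear_dict out) := by unfold Spec_get_quadratic; infer_instance

-- ===== CLAIM (what is proved, stated in full; the proofs are below) =====
def Claim_equal_get_quadratic : Prop := ∀ (linear_dict : List (String × Int)), Dom_get_quadratic linear_dict → Spec_get_quadratic linear_dict (get_quadratic linear_dict)

-- ===== LEMMAS AND PROOFS =====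

-- the sorted pair, and the value A adds for it
def sp (a b : String) : String × String := if b < a then (b, a) else (a, b)

def cf (d : PySem.Dict String Int) (p : String × String) : Int :=
  d.getD p.1 0 * d.getD p.2 0

-- A's += on a defaultdict(int) entry
def madd {κ : Type} [BEq κ] (q : PySem.Dict κ Int) (p : κ) (c : Int) : PySem.Dict κ Int :=
  q.modify p 0 (· + c)

lemma madd_eq_insert {κ : Type} [BEq κ] (q : PySem.Dict κ Int) (p : κ) (c : Int) :
    madd q p c = q.insert p (q.getD p 0 + c) := rfl

lemma innerA_eq (d : PySem.Dict String Int) (q : PySem.Dict (String × String) Int)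
    (k0 k1 : String) : innerA d q k0 k1 = madd q (sp k0 k1) (cf d (sp k0 k1)) := by
  by_cases h : k1 < k0 <;> simp [innerA, sp, cf, madd, h]

lemma stepB_eq (k0 : String) (v0 : Int) (q : PySem.Dict (String × String) Int)
    (p : String × Int) : stepB k0 v0 q p = q.insert (sp k0 p.1) (2 * v0 * p.2) := by
  by_cases h : p.1 < k0 <;> simp [stepB, sp, h]

lemma sp_cases (a b : String) : sp a b = (a, b) ∨ sp a b = (b, a) := by
  unfold sp; split <;> simp

lemma sp_self (a : String) : sp a a = (a, a) := by simp [sp]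

lemma sp_comm (a b : String) : sp a b = sp b a := by
  unfold sp
  rcases lt_trichotomy a b with h | h | h
  · simp [h, asymm h]
  · simp [h]
  · simp [h, asymm h]

lemma sp_eq_sp_imp {a b c d : String} (h : sp a b = sp c d) :
    (a = c ∧ b = d) ∨ (a = d ∧ b = c) := by
  rcases sp_cases a b with h1 | h1 <;> rcases sp_cases c d with h2 | h2 <;>
    rw [h1, h2] at h <;> obtain ⟨e1, e2⟩ := Prod.mk.injEq .. ▸ h <;> tauto

lemma contains_madd {κ : Type} [BEq κ] [LawfulBEq κ] (q : PySem.Dict κ Int) (p p' : κ)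
    (c : Int) (h : q.contains p' = true) : (madd q p c).contains p' = true := by
  rw [madd_eq_insert, PySem.Dict.contains_insert, h, Bool.or_true]

lemma madd_comm {κ : Type} [BEq κ] [LawfulBEq κ] (q : PySem.Dict κ Int) (p p' : κ)
    (c c' : Int) (h : q.contains p = true) :
    madd (madd q p' c') p c = madd (madd q p c) p' c' := by
  by_cases hpp : p = p'
  · subst hpp
    simp only [madd_eq_insert, PySem.Dict.getD_insert_self, PySem.Dict.insert_insert_self]
    congr 1
    ring
  · have hx : (q.insert p' (q.getD p' 0 + c')).getD p 0 = q.getD p 0 :=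
      PySem.Dict.getD_insert_of_ne _ _ _ hpp
    have hy : (q.insert p (q.getD p 0 + c)).getD p' 0 = q.getD p' 0 :=
      PySem.Dict.getD_insert_of_ne _ _ _ (Ne.symm hpp)
    simp only [madd_eq_insert, hx, hy]
    have h1 : (q.insert p' (q.getD p' 0 + c')).contains p = true := by
      rw [PySem.Dict.contains_insert, h, Bool.or_true]
    apply PySem.Dict.ext
    by_cases hc' : q.contains p' = true
    · have h2 : (q.insert p (q.getD p 0 + c)).contains p' = true := by
        rw [PySem.Dict.contains_insert, hc', Bool.or_true]
      rw [PySem.Dict.items_insert_of_contains _ _ h1,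
        PySem.Dict.items_insert_of_contains _ _ hc',
        PySem.Dict.items_insert_of_contains _ _ h2,
        PySem.Dict.items_insert_of_contains _ _ h,
        List.map_map, List.map_map]
      apply List.map_congr_left
      intro e _
      by_cases e1 : e.1 = p' <;> by_cases e2 : e.1 = p <;>
        simp [Function.comp, e1, e2, hpp, Ne.symm hpp]
    · have hc'f : q.contains p' = false := by revert hc'; cases q.contains p' <;> simp
      have h2 : (q.insert p (q.getD p 0 + c)).contains p' = false := by
        rw [PySem.Dict.contains_insert, hc'f]
        simp [Ne.symm hpp]
      rw [PySem.Dict.items_insert_of_contains _ _ h1,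
        PySem.Dict.items_insert_of_not_contains _ _ hc'f,
        PySem.Dict.items_insert_of_not_contains _ _ h2,
        PySem.Dict.items_insert_of_contains _ _ h,
        List.map_append]
      simp [hpp, Ne.symm hpp]

lemma foldl_madd_madd_comm {κ α : Type} [BEq κ] [LawfulBEq κ] (l : List α) (key : α → κ)
    (c : α → Int) (p : κ) (cp : Int) (q : PySem.Dict κ Int) (h : q.contains p = true) :
    l.foldl (fun q a => madd q (key a) (c a)) (madd q p cp)
      = madd (l.foldl (fun q a => madd q (key a) (c a)) q) p cp := by
  induction l generalizing q with
  | nil => rfl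
  | cons a l ih =>
    simp only [List.foldl_cons]
    rw [← madd_comm q p (key a) cp (c a) h, ih _ (contains_madd _ _ _ _ h)]

lemma contains_foldl_madd {κ α : Type} [BEq κ] [LawfulBEq κ] (l : List α) (key : α → κ)
    (c : α → Int) (q : PySem.Dict κ Int) (p : κ) (h : q.contains p = true) :
    (l.foldl (fun q a => madd q (key a) (c a)) q).contains p = true := by
  induction l generalizing q with
  | nil => exact h
  | cons a l ih => exact ih _ (contains_madd _ _ _ _ h)

lemma foldl_madd_row_comm {κ α β : Type} [BEq κ] [LawfulBEq κ] (l : List α) (key : α → κ)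
    (c : α → Int) (l2 : List β) (k2 : β → κ) (c2 : β → Int) (q : PySem.Dict κ Int)
    (h : ∀ a ∈ l, q.contains (key a) = true) :
    l.foldl (fun q a => madd q (key a) (c a)) (l2.foldl (fun q b => madd q (k2 b) (c2 b)) q)
      = l2.foldl (fun q b => madd q (k2 b) (c2 b))
          (l.foldl (fun q a => madd q (key a) (c a)) q) := by
  induction l generalizing q with
  | nil => rfl
  | cons a l ih =>
    simp only [List.foldl_cons]
    rw [← foldl_madd_madd_comm l2 k2 c2 _ _ _ (h a (by simp)),
      ih _ (fun a' ha' => contains_madd _ _ _ _ (h a' (by simp [ha'])))]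

lemma pull {κ α β : Type} [BEq κ] [LawfulBEq κ] (l : List α) (key : α → κ) (c : α → Int)
    (l2 : List β) (k2 : α → β → κ) (c2 : α → β → Int) (q : PySem.Dict κ Int)
    (h : ∀ a ∈ l, q.contains (key a) = true) :
    l.foldl (fun q a => l2.foldl (fun q b => madd q (k2 a b) (c2 a b)) (madd q (key a) (c a))) q
      = l.foldl (fun q a => l2.foldl (fun q b => madd q (k2 a b) (c2 a b)) q)
          (l.foldl (fun q a => madd q (key a) (c a)) q) := by
  induction l generalizing q with
  | nil => rfl
  | cons a l ih =>
    simp only [List.foldl_cons]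
    have hmono : ∀ a' ∈ l, (l2.foldl (fun q b => madd q (k2 a b) (c2 a b)) (madd q (key a) (c a))).contains (key a') = true :=
      fun a' ha' => contains_foldl_madd _ _ _ _ _ (contains_madd _ _ _ _ (h a' (by simp [ha'])))
    rw [ih _ hmono,
      foldl_madd_row_comm l key c l2 (k2 a) (c2 a) _
        (fun a' ha' => contains_madd _ _ _ _ (h a' (by simp [ha'])))]

-- a fold of += over fresh, pairwise-distinct keys appends its entries
lemma items_foldl_madd_fresh {κ α : Type} [BEq κ] [LawfulBEq κ] (l : List α) (key : α → κ)
    (c : α → Int) (q : PySem.Dict κ Int) (hnd : (l.map key).Nodup)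
    (hf : ∀ a ∈ l, q.contains (key a) = false) :
    (l.foldl (fun q a => madd q (key a) (c a)) q).items
      = q.items ++ l.map (fun a => (key a, 0 + c a)) := by
  induction l generalizing q with
  | nil => simp
  | cons a l ih =>
    simp only [List.foldl_cons, List.map_cons]
    have hfa := hf a (by simp)
    have hstep : madd q (key a) (c a) = q.insert (key a) (0 + c a) := by
      rw [madd_eq_insert, PySem.Dict.getD_of_not_contains _ _ hfa]
    rw [hstep, ih _ ((List.nodup_cons.mp hnd).2) ?fresh]
    · rw [PySem.Dict.items_insert_of_not_contains _ _ hfa]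
      simp
    case fresh =>
      intro b hb
      rw [PySem.Dict.contains_insert]
      have hne : (key b == key a) = false := by
        simp only [beq_eq_false_iff_ne, ne_eq]
        intro e
        exact (List.nodup_cons.mp hnd).1 (e ▸ List.mem_map_of_mem hb)
      rw [hne, hf b (List.mem_cons_of_mem _ hb), Bool.or_self]

-- a fold of += whose keys form a trailing block of the dict updates that block in place
lemma adds_block {κ α : Type} [BEq κ] [LawfulBEq κ] (l : List α) (key : α → κ)
    (c y : α → Int) (I : List (κ × Int)) (q : PySem.Dict κ Int)
    (hitems : q.items = I ++ l.map (fun a => (key a, y a)))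
    (hqnd : q.keys.Nodup) (hnd : (l.map key).Nodup)
    (hI : ∀ a ∈ l, ∀ e ∈ I, e.1 ≠ key a) :
    (l.foldl (fun q a => madd q (key a) (c a)) q).items
      = I ++ l.map (fun a => (key a, y a + c a)) := by
  induction l generalizing q I with
  | nil => simpa using hitems
  | cons a l ih =>
    simp only [List.foldl_cons, List.map_cons] at hitems hnd ⊢
    have hmem : (key a, y a) ∈ q.items := by rw [hitems]; simp
    have hcont : q.contains (key a) = true := by
      rw [PySem.Dict.contains_iff_mem_keys]
      exact List.mem_map_of_mem (f := Prod.fst) hmem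
    have hget : q.getD (key a) 0 = y a := PySem.Dict.getD_of_mem_items _ hmem hqnd 0
    have hstep : madd q (key a) (c a) = q.insert (key a) (y a + c a) := by
      rw [madd_eq_insert, hget]
    have hIid : I.map (fun e => if e.1 == key a then (key a, y a + c a) else e) = I := by
      conv_rhs => rw [← List.map_id I]
      exact List.map_congr_left (fun e he => by
        have := hI a (by simp) e he
        simp [this])
    have htlid : l.map ((fun e => if e.1 == key a then (key a, y a + c a) else e) ∘
        (fun b => (key b, y b))) = l.map (fun b => (key b, y b)) :=
      List.map_congr_left (fun b hb => by
        have : key b ≠ key a := fun e =>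
          (List.nodup_cons.mp hnd).1 (e ▸ List.mem_map_of_mem hb)
        simp [Function.comp, this])
    have hitems' : (q.insert (key a) (y a + c a)).items
        = (I ++ [(key a, y a + c a)]) ++ l.map (fun b => (key b, y b)) := by
      rw [PySem.Dict.items_insert_of_contains _ _ hcont, hitems, List.map_append,
        List.map_cons, List.map_map, hIid, htlid]
      simp
    have hqnd' : (q.insert (key a) (y a + c a)).keys.Nodup := by
      rw [PySem.Dict.keys_insert_of_contains _ _ hcont]
      exact hqnd
    rw [hstep, ih _ _ hitems' hqnd' ((List.nodup_cons.mp hnd).2) ?hI']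
    · simp
    case hI' =>
      intro b hb e he
      rcases List.mem_append.mp he with h1 | h1
      · exact hI b (List.mem_cons_of_mem _ hb) e h1
      · have he1 : e = (key a, y a + c a) := by simpa using h1
        rw [he1]
        exact fun e2 => (List.nodup_cons.mp hnd).1
          (by rw [show key a = key b from e2]; exact List.mem_map_of_mem hb)

lemma main_lemma (d : PySem.Dict String Int) (es : List (String × Int)) :
    ∀ (q : PySem.Dict (String × String) Int),
    (es.map Prod.fst).Nodup →
    (∀ p ∈ es, d.get? p.1 = some p.2) →
    (∀ a ∈ es.map Prod.fst, ∀ b ∈ es.map Prod.fst, q.contains (sp a b) = false) →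
    q.keys.Nodup →
    (es.map Prod.fst).foldl
        (fun q k0 => (es.map Prod.fst).foldl (fun q k1 => innerA d q k0 k1) q) q
      = goB q es := by
  induction es with
  | nil => intro q _ _ _ _; rfl
  | cons e es ih =>
    obtain ⟨k0, v0⟩ := e
    intro q hnd hvals hfresh hqnd
    simp only [List.map_cons] at hnd hfresh ⊢
    have hk0 : k0 ∉ es.map Prod.fst := (List.nodup_cons.mp hnd).1
    have hnd' : (es.map Prod.fst).Nodup := (List.nodup_cons.mp hnd).2
    have hgd : ∀ p ∈ (k0, v0) :: es, d.getD p.1 0 = p.2 := by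
      intro p hp
      rw [PySem.Dict.getD_eq_get?_getD, hvals p hp]
      rfl
    have hgd0 : d.getD k0 0 = v0 := hgd (k0, v0) (by simp)
    -- the keys sp k0 · of row 0, in order, are pairwise distinct
    have hndrow : ((k0 :: es.map Prod.fst).map (fun k1 => sp k0 k1)).Nodup := by
      simp only [List.map_cons, List.nodup_cons]
      constructor
      · intro hmem
        obtain ⟨b, hb, hb2⟩ := List.mem_map.mp hmem
        rcases sp_eq_sp_imp hb2 with ⟨h1, h2⟩ | ⟨h1, h2⟩ <;> exact hk0 (h2 ▸ hb)
      · exact List.Nodup.map_on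
          (fun a ha b hb hab => by
            rcases sp_eq_sp_imp hab with ⟨h1, h2⟩ | ⟨h1, h2⟩
            · exact h2
            · exact (hk0 (by rw [← h2]; exact ha)).elim) hnd'
    have hfrow : ∀ k1 ∈ k0 :: es.map Prod.fst, q.contains (sp k0 k1) = false :=
      fun k1 hk1 => hfresh k0 (by simp) k1 (by simpa using hk1)
    have hnotmem : ∀ a ∈ k0 :: es.map Prod.fst, ∀ b ∈ k0 :: es.map Prod.fst,
        sp a b ∉ q.keys := by
      intro a ha b hb hmem
      have := hfresh a (by simpa using ha) b (by simpa using hb)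
      rw [← Bool.not_eq_true, PySem.Dict.contains_iff_mem_keys] at this
      exact this hmem
    simp only [innerA_eq, List.foldl_cons]
    -- row 0 appends its fresh entries
    have hq1items := items_foldl_madd_fresh (k0 :: es.map Prod.fst)
      (fun k1 => sp k0 k1) (fun k1 => cf d (sp k0 k1)) q hndrow hfrow
    simp only [List.foldl_cons, List.map_cons] at hq1items
    set q1 := (es.map Prod.fst).foldl
      (fun q k1 => madd q (sp k0 k1) (cf d (sp k0 k1)))
      (madd q (sp k0 k0) (cf d (sp k0 k0))) with hq1def
    have hq1keys : q1.keys = q.keys ++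
        sp k0 k0 :: (es.map Prod.fst).map (fun k1 => sp k0 k1) := by
      show q1.items.map Prod.fst = _
      rw [hq1items]
      simp only [List.map_append, List.map_cons, List.map_map]
      rfl
    have hq1cont : ∀ k ∈ es.map Prod.fst, q1.contains (sp k k0) = true := by
      intro k hk
      rw [PySem.Dict.contains_iff_mem_keys, hq1keys, sp_comm k k0]
      exact List.mem_append_right _ (List.mem_cons_of_mem _ (List.mem_map_of_mem hk))
    -- pull the first-column += of every later row out in front
    rw [pull (es.map Prod.fst) (fun k => sp k k0) (fun k => cf d (sp k k0))
      (es.map Prod.fst) (fun a b => sp a b) (fun a b => cf d (sp a b)) q1 hq1cont]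
    set q2 := (es.map Prod.fst).foldl
      (fun q k => madd q (sp k k0) (cf d (sp k k0))) q1 with hq2def
    -- those += update row 0's off-diagonal block in place
    have hq1nd : q1.keys.Nodup := by
      rw [hq1keys, List.nodup_append]
      refine ⟨hqnd, by simpa using hndrow, ?_⟩
      intro x hx y hy hxy
      subst hxy
      simp only [List.mem_cons, List.mem_map] at hy
      rcases hy with h1 | ⟨b, hb, hb2⟩
      · exact hnotmem k0 (by simp) k0 (by simp) (h1 ▸ hx)
      · exact hnotmem k0 (by simp) b (by simp [hb]) (hb2 ▸ hx)
    have hblock := adds_block (es.map Prod.fst) (fun k => sp k k0)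
      (fun k => cf d (sp k k0)) (fun k => 0 + cf d (sp k0 k))
      (q.items ++ [(sp k0 k0, 0 + cf d (sp k0 k0))]) q1
      (by rw [hq1items]
          simp only [List.append_assoc, List.singleton_append]
          exact congrArg (fun t => q.items ++ (sp k0 k0, 0 + cf d (sp k0 k0)) :: t)
            (List.map_congr_left
              (fun a _ => congrArg (fun z => (z, 0 + cf d (sp k0 a))) (sp_comm k0 a))))
      hq1nd
      (List.Nodup.map_on
        (fun a ha b hb hab => by
          rcases sp_eq_sp_imp hab with ⟨h1, h2⟩ | ⟨h1, h2⟩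
          · exact h1
          · exact (hk0 (by rw [← h1]; exact ha)).elim) hnd')
      (by
        intro a ha e he
        rcases List.mem_append.mp he with h1 | h1
        · intro hcontra
          exact hnotmem a (by simp [ha]) k0 (by simp)
            (by rw [show sp a k0 = e.1 from hcontra.symm]; exact List.mem_map_of_mem h1)
        · have he1 : e = (sp k0 k0, 0 + cf d (sp k0 k0)) := by simpa using h1
          rw [he1]
          intro hcontra
          rcases sp_eq_sp_imp (show sp k0 k0 = sp a k0 from hcontra) with ⟨h1, h2⟩ | ⟨h1, h2⟩
          · exact hk0 (by rw [h1]; exact ha)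
          · exact hk0 (by rw [h2]; exact ha))
    -- B's state after the first while-iteration has exactly the same items
    have hinsfresh : q.contains ((k0, k0) : String × String) = false := by
      have := hfrow k0 (by simp)
      rwa [sp_self] at this
    have hstepBeq : stepB k0 v0 = fun q p => q.insert (sp k0 p.1) (2 * v0 * p.2) :=
      funext fun q => funext fun p => stepB_eq k0 v0 q p
    have hbfresh : ∀ p ∈ es, (q.insert (k0, k0) (v0 * v0)).contains (sp k0 p.1) = false := by
      intro p hp
      rw [PySem.Dict.contains_insert]
      have h1 : (sp k0 p.1 == ((k0, k0) : String × String)) = false := by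
        simp only [beq_eq_false_iff_ne, ne_eq]
        intro hcontra
        rcases sp_eq_sp_imp (hcontra.trans (sp_self k0).symm) with ⟨h1, h2⟩ | ⟨h1, h2⟩ <;>
          exact hk0 (h2 ▸ List.mem_map_of_mem hp)
      rw [h1, hfresh k0 (by simp) p.1 (List.mem_cons_of_mem _ (List.mem_map_of_mem hp)), Bool.or_self]
    have hbnd : (es.map (fun p => sp k0 p.1)).Nodup := by
      have : es.map (fun p => sp k0 p.1)
          = (es.map Prod.fst).map (fun k => sp k0 k) := by
        rw [List.map_map]
        rfl
      rw [this]
      exact List.Nodup.map_on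
        (fun a ha b hb hab => by
          rcases sp_eq_sp_imp hab with ⟨h1, h2⟩ | ⟨h1, h2⟩
          · exact h2
          · exact (hk0 (by rw [← h2]; exact ha)).elim) hnd'
    have hq2'items : (es.foldl (stepB k0 v0) (q.insert (k0, k0) (v0 * v0))).items
        = q.items ++ ((k0, k0), v0 * v0) :: es.map (fun p => (sp k0 p.1, 2 * v0 * p.2)) := by
      rw [hstepBeq, PySem.Dict.items_foldl_insert_fresh _ _ _ _ hbfresh hbnd,
        PySem.Dict.items_insert_of_not_contains _ _ hinsfresh]
      simp
    -- the two states coincide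
    have hq2eq : q2 = es.foldl (stepB k0 v0) (q.insert (k0, k0) (v0 * v0)) := by
      apply PySem.Dict.ext
      rw [hblock, hq2'items]
      simp only [List.append_assoc, List.singleton_append]
      congr 1
      congr 1
      · simp [cf, sp_self, hgd0]
      · have : (es.map Prod.fst).map
            (fun k => (sp k k0, (0 + cf d (sp k0 k)) + cf d (sp k k0)))
            = es.map (fun p => (sp p.1 k0, (0 + cf d (sp k0 p.1)) + cf d (sp p.1 k0))) := by
          rw [List.map_map]
          rfl
        rw [this]
        apply List.map_congr_left
        intro p hp
        have hgdp : d.getD p.1 0 = p.2 := hgd p (by simp [hp])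
        have hcf : cf d (sp k0 p.1) = v0 * p.2 := by
          rcases sp_cases k0 p.1 with h | h <;> simp [cf, h, hgd0, hgdp] <;> ring
        show (sp p.1 k0, (0 + cf d (sp k0 p.1)) + cf d (sp p.1 k0))
            = (sp k0 p.1, 2 * v0 * p.2)
        rw [sp_comm p.1 k0, hcf]
        congr 1
        ring
    -- hypotheses of the induction hypothesis at the new state
    have hq2keys : q2.keys = q.keys ++ sp k0 k0 ::
        (es.map Prod.fst).map (fun k => sp k k0) := by
      show q2.items.map Prod.fst = _
      rw [hblock]
      simp only [List.map_append, List.map_cons, List.map_map,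
        List.append_assoc, List.cons_append, List.nil_append]
      rfl
    have hfresh2 : ∀ a ∈ es.map Prod.fst, ∀ b ∈ es.map Prod.fst,
        q2.contains (sp a b) = false := by
      intro a ha b hb
      rw [← Bool.not_eq_true, PySem.Dict.contains_iff_mem_keys, hq2keys]
      intro hmem
      rcases List.mem_append.mp hmem with h1 | h1
      · exact hnotmem a (by simp [ha]) b (by simp [hb]) h1
      · rcases List.mem_cons.mp h1 with h2 | h2
        · rcases sp_eq_sp_imp h2 with ⟨e1, e2⟩ | ⟨e1, e2⟩ <;>
            exact hk0 (by rw [← e1]; exact ha)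
        · obtain ⟨k, hk, hk2⟩ := List.mem_map.mp h2
          rcases sp_eq_sp_imp hk2.symm with ⟨e1, e2⟩ | ⟨e1, e2⟩
          · exact hk0 (e2 ▸ hb)
          · exact hk0 (e1 ▸ ha)
    have hq2nd : q2.keys.Nodup := by
      rw [hq2keys, List.nodup_append]
      refine ⟨hqnd, ?_, ?_⟩
      · simp only [List.nodup_cons]
        constructor
        · intro hmem
          obtain ⟨b, hb, hb2⟩ := List.mem_map.mp hmem
          rcases sp_eq_sp_imp hb2 with ⟨e1, e2⟩ | ⟨e1, e2⟩ <;>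
            exact hk0 (by rw [← e1]; exact hb)
        · exact List.Nodup.map_on
            (fun a ha b hb hab => by
              rcases sp_eq_sp_imp hab with ⟨h1, h2⟩ | ⟨h1, h2⟩
              · exact h1
              · exact (hk0 (by rw [← h1]; exact ha)).elim) hnd'
      · intro x hx y hy hxy
        subst hxy
        simp only [List.mem_cons, List.mem_map] at hy
        rcases hy with h1 | ⟨b, hb, hb2⟩
        · exact hnotmem k0 (by simp) k0 (by simp) (h1 ▸ hx)
        · exact hnotmem k0 (by simp) b (by simp [hb])
            (by rw [sp_comm k0 b, hb2]; exact hx)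
    have ih' := ih q2 hnd' (fun p hp => hvals p (by simp [hp])) hfresh2 hq2nd
    simp only [innerA_eq] at ih'
    rw [ih', hq2eq]
    rfl

-- ===== VERDICT (by name: the statement is the Claim_ definition above) =====
theorem get_quadratic_spec : Claim_equal_get_quadratic := by
  intro linear_dict _
  unfold Spec_get_quadratic get_quadratic get_quadratic_alt
  have h := main_lemma (PySem.Dict.ofList linear_dict) (PySem.Dict.ofList linear_dict).items
    PySem.Dict.empty (PySem.Dict.nodup_keys_ofList linear_dict)
    (fun p hp => PySem.Dict.get?_of_mem_items _ (by simpa using hp) (PySem.Dict.nodup_keys_ofList linear_dict))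
    (fun a _ b _ => by simp [PySem.Dict.contains_empty]) (by simp [PySem.Dict.keys_empty])
  simp only []
  rw [show (PySem.Dict.ofList linear_dict).keys
      = (PySem.Dict.ofList linear_dict).items.map Prod.fst from rfl, h]
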